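-- pv_equiv track=rewrite | github.com/alanbernstein/jumble | webclient.py | format_layout
-- ===== SOURCE A (Python) =====
-- def format_layout(layout):
--     """
--     needs to be parsed:
--     'OUT{ TO }PASTURE' -> solution = OUTPASTURE, display = "___ TO _______"
--     just use state machine to track whether inside parens
--     """
--     # too naive:
--     # s1 = re.sub('[A-Z]', '_', layout)
--     # s2 = re.sub('[{}]', '', s1)
--
--     disp = ''
--     state = 0
--     for c in layout:
--         if c == '{':
--             state = 1
--         elif c == '}':
--             state = 0
--         elif state == 0 and c in 'ABCDEFGHIJKLMNOPQRSTUVWXYZ':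
--             disp += '_'
--         else:
--             disp += c
--     return disp
-- ===== SOURCE B (Python) =====
-- def format_layout(layout):
--     # Segment-based: split the string into brace-free chunks, mask whole
--     # chunks that lie outside braces, pass the others through unchanged.
--     parts = []
--     inside = False
--     i = 0
--     n = len(layout)
--     while i < n:
--         c = layout[i]
--         if c in '{}':
--             inside = (c == '{')
--             i += 1
--         else:
--             j = i
--             while j < n and layout[j] not in '{}':
--                 j += 1
--             seg = layout[i:j]
--             if inside:
--                 parts.append(seg)
--             else:
--                 parts.append(''.join('_' if 'A' <= ch <= 'Z' else ch for ch in seg))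
--             i = j
--     return ''.join(parts)
-- ===== Notes on version B (the rewrite author's own statement) =====
-- stated objective: alternative
-- what changed: Replaces A's per-character state-machine append with a segment splitter: braces are consumed as delimiters toggling the inside flag, and each maximal brace-free chunk is emitted whole (masked outside braces) and joined at the end.
import Mathlib
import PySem

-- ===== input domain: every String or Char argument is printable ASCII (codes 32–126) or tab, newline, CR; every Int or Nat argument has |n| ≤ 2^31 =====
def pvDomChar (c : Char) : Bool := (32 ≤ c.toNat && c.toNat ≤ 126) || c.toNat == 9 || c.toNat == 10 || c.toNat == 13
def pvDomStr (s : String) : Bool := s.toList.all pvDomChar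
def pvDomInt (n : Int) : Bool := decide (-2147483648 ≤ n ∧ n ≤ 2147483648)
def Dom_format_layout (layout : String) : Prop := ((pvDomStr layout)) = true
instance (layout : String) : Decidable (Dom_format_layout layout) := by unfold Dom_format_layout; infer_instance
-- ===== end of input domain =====

-- B replaces A's per-character state machine by a segment splitter that masks
-- whole brace-free chunks at once (objective: alternative decomposition).

-- ===== PORT A =====
-- per-character fold carrying (disp, state), exactly A's loop
def format_layout (layout : String) : String :=
  let r := layout.toList.foldl (fun (acc : List Char × Int) c =>
      if c = '{' then (acc.1, 1)
      else if c = '}' then (acc.1, 0)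
      else if acc.2 = 0 ∧ "ABCDEFGHIJKLMNOPQRSTUVWXYZ".toList.contains c then
        (acc.1 ++ ['_'], acc.2)
      else (acc.1 ++ [c], acc.2)) ([], 0)
  String.ofList r.1

-- ===== PORT B =====
def pvIsBrace (c : Char) : Bool := c = '{' || c = '}'

-- ''.join('_' if 'A' <= ch <= 'Z' else ch for ch in seg)
def pvMaskSeg (seg : List Char) : List Char :=
  seg.map (fun ch => if 'A' ≤ ch ∧ ch ≤ 'Z' then '_' else ch)

-- B's outer while loop: consume one brace, or a maximal brace-free chunk
def pvAltGo : List Char → Bool → List (List Char) → List (List Char)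
  | [], _, parts => parts
  | c :: rest, inside, parts =>
    if pvIsBrace c then pvAltGo rest (c = '{') parts
    else
      let seg := c :: rest.takeWhile (fun ch => !pvIsBrace ch)
      let rest' := rest.dropWhile (fun ch => !pvIsBrace ch)
      pvAltGo rest' inside (parts ++ [if inside then seg else pvMaskSeg seg])
  termination_by l => l.length
  decreasing_by
    · simp
    · exact Nat.lt_succ_of_le (List.length_dropWhile_le _ _)

def format_layout_alt (layout : String) : String :=
  String.ofList ((pvAltGo layout.toList false []).flatten)

-- ===== PRECONDITION & SPEC =====
def Spec_format_layout (layout : String) (out : String) : Prop := out = format_layout_alt layout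
instance (layout : String) (out : String) : Decidable (Spec_format_layout layout out) := by unfold Spec_format_layout; infer_instance

-- ===== CLAIM (what is proved, stated in full; the proofs are below) =====
def Claim_equal_format_layout : Prop := ∀ (layout : String), Dom_format_layout layout → Spec_format_layout layout (format_layout layout)

-- ===== LEMMAS AND PROOFS =====

-- common reference: the masked character stream, driven by A's Int state
def pvSpec : List Char → Int → List Char
  | [], _ => []
  | c :: rest, st =>
    if c = '{' then pvSpec rest 1
    else if c = '}' then pvSpec rest 0
    else (if st = 0 ∧ ('A' ≤ c ∧ c ≤ 'Z') then '_' else c) :: pvSpec rest st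

theorem pv_upper (c : Char) :
    ("ABCDEFGHIJKLMNOPQRSTUVWXYZ".toList.contains c = true) ↔ ('A' ≤ c ∧ c ≤ 'Z') := by
  have hlist : "ABCDEFGHIJKLMNOPQRSTUVWXYZ".toList
      = ['A','B','C','D','E','F','G','H','I','J','K','L','M',
         'N','O','P','Q','R','S','T','U','V','W','X','Y','Z'] := by decide
  rw [hlist]
  constructor
  · intro h
    simp only [List.contains_eq_mem, decide_eq_true_eq, List.mem_cons,
      List.not_mem_nil, or_false] at h
    rcases h with h|h|h|h|h|h|h|h|h|h|h|h|h|h|h|h|h|h|h|h|h|h|h|h|h|h <;>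
      subst h <;> exact ⟨by decide, by decide⟩
  · rintro ⟨h1, h2⟩
    have hl : 65 ≤ c.toNat := h1
    have hr : c.toNat ≤ 90 := h2
    have hc := (Char.ofNat_toNat c).symm
    interval_cases h : c.toNat <;> rw [hc] <;> decide

theorem pv_foldA (l : List Char) (acc : List Char) (st : Int) :
    (l.foldl (fun (acc : List Char × Int) c =>
      if c = '{' then (acc.1, 1)
      else if c = '}' then (acc.1, 0)
      else if acc.2 = 0 ∧ "ABCDEFGHIJKLMNOPQRSTUVWXYZ".toList.contains c then
        (acc.1 ++ ['_'], acc.2)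
      else (acc.1 ++ [c], acc.2)) (acc, st)).1 = acc ++ pvSpec l st := by
  induction l generalizing acc st with
  | nil => simp [pvSpec]
  | cons c rest ih =>
    have hcond : ("ABCDEFGHIJKLMNOPQRSTUVWXYZ".toList.contains c = true)
        = ('A' ≤ c ∧ c ≤ 'Z') := propext (pv_upper c)
    simp only [List.foldl_cons, hcond]
    by_cases h1 : c = '{'
    · simp only [if_pos h1, ih]
      simp [pvSpec, h1]
    · by_cases h2 : c = '}'
      · simp only [if_neg h1, if_pos h2, ih]
        simp [pvSpec, h2]
      · by_cases h3 : st = 0 ∧ ('A' ≤ c ∧ c ≤ 'Z')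
        · simp only [if_neg h1, if_neg h2, if_pos h3, ih]
          simp [pvSpec, h1, h2, h3]
        · simp only [if_neg h1, if_neg h2, if_neg h3, ih]
          simp [pvSpec, h1, h2, h3]

-- a brace-free prefix is consumed by pvSpec as one mapped chunk
theorem pv_spec_chunk (seg rest : List Char) (st : Int)
    (hseg : ∀ ch ∈ seg, pvIsBrace ch = false) :
    pvSpec (seg ++ rest) st
      = seg.map (fun ch => if st = 0 ∧ ('A' ≤ ch ∧ ch ≤ 'Z') then '_' else ch) ++ pvSpec rest st := by
  induction seg with
  | nil => simp
  | cons c s ih =>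
    have hc := hseg c (by simp)
    have h1 : ¬ c = '{' := by intro h; simp [pvIsBrace, h] at hc
    have h2 : ¬ c = '}' := by intro h; simp [pvIsBrace, h] at hc
    simp only [List.cons_append, pvSpec, if_neg h1, if_neg h2, List.map_cons]
    rw [ih (fun ch hm => hseg ch (by simp [hm]))]

theorem pv_altGo (l : List Char) (inside : Bool) (parts : List (List Char)) :
    (pvAltGo l inside parts).flatten
      = parts.flatten ++ pvSpec l (if inside then 1 else 0) := by
  fun_induction pvAltGo l inside parts with
  | case1 _ parts => simp [pvSpec]
  | case2 c rest inside parts hb ih =>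
    rw [ih]
    by_cases h : c = '{'
    · simp [pvSpec, h]
    · have h2 : c = '}' := by
        simp [pvIsBrace, h] at hb; exact hb
      simp [pvSpec, h2]
  | case3 c rest inside parts hb seg rest' ih =>
    have hsplit : c :: rest = seg ++ rest' := by
      simp only [seg, rest', List.cons_append, List.takeWhile_append_dropWhile]
    have hseg : ∀ ch ∈ seg, pvIsBrace ch = false := by
      intro ch hm
      rcases List.mem_cons.mp hm with h | h
      · subst h; simpa using hb
      · have := List.mem_takeWhile_imp h; simpa using this
    simp only [dite_eq_ite] at ih
    rw [ih, hsplit, pv_spec_chunk seg rest' _ hseg]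
    cases inside with
    | false => simp [pvMaskSeg]
    | true => simp

-- ===== VERDICT (by name: the statement is the Claim_ definition above) =====
theorem format_layout_spec : Claim_equal_format_layout := by
  intro layout _
  unfold Spec_format_layout format_layout format_layout_alt
  simp only [pv_altGo, pv_foldA]
  simp
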